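-- pv_equiv track=rewrite | github.com/hershler/google-project | src/--code--/utils.py | normal_string
-- ===== SOURCE A (Python) =====
-- def normal_string(string):
--     ret = ""
--     length = len(string)
--
--     for i in range(length):
--
--         if string[i].isalpha():
--             ret += string[i]
--         elif ' ' == string[i] and i:
--             if ' ' != string[i - 1]:
--                 ret += ' '
--     ret2 = ret
--     if ret and ' ' == ret[-1]:
--         ret2 = ret[:-2]
--     return ret2.lower()
-- ===== SOURCE B (Python) =====
-- def normal_string(string):
--     # Pass 1: collapse each run of spaces to its first space (neighbour test on the
--     # original string), then drop a space left at the front.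
--     collapsed = []
--     prev = None
--     for c in string:
--         if c != ' ' or prev != ' ':
--             collapsed.append(c)
--         prev = c
--     if collapsed and collapsed[0] == ' ':
--         collapsed = collapsed[1:]
--     # Pass 2: keep letters and the surviving spaces.
--     kept = [c for c in collapsed if c.isalpha() or c == ' ']
--     # Same trailing rule as the original: a trailing space removes itself and the
--     # character before it.
--     if kept and kept[-1] == ' ':
--         kept = kept[:-2]
--     return ''.join(kept).lower()
-- ===== Notes on version B (the rewrite author's own statement) =====
-- stated objective: alternative
-- what changed: Replaces A's single index-based scan (with lookback at string[i-1]) by a multi-pass pipeline: collapse each run of spaces to its first space, drop a leading space, filter to letters and spaces, then the same trailing trim and lowercase.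
import Mathlib
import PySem

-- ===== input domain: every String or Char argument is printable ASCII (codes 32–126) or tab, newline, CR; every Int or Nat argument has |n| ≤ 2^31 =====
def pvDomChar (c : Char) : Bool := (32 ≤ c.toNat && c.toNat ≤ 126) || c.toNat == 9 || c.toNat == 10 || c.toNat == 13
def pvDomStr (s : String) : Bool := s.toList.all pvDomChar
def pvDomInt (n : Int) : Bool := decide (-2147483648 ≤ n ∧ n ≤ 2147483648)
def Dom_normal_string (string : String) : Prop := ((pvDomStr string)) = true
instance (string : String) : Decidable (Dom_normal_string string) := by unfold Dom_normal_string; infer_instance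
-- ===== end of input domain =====

-- B replaces A's single index-based scan by a multi-pass pipeline (collapse space
-- runs, drop a leading space, filter to letters/spaces, same trailing trim);
-- objective: alternative decomposition, same cost.

-- ===== PORT A =====
def normal_string (string : String) : String :=
  let cs := string.toList
  let length := PySem.Str.len string
  let ret := (PySem.List.pyRange 0 length 1).foldl
    (fun ret i =>
      if PySem.Chars.isalpha (PySem.List.pyGetD cs i ' ') then
        ret ++ [PySem.List.pyGetD cs i ' ']
      else if PySem.List.pyGetD cs i ' ' = ' ' ∧ i ≠ 0 then
        (if PySem.List.pyGetD cs (i - 1) ' ' ≠ ' ' then ret ++ [' '] else ret)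
      else ret)
    ([] : List Char)
  let ret2 := if ret ≠ [] ∧ PySem.List.pyGetD ret (-1) ' ' = ' ' then
      PySem.List.slice ret none (some (-2)) else ret
  String.ofList (PySem.Chars.lower ret2)

-- ===== PORT B =====
def normal_string_alt (string : String) : String :=
  -- pass 1: collapse each run of spaces to its first space (neighbour read from the original)
  let st := string.toList.foldl
    (fun (st : List Char × Option Char) c =>
      (if c ≠ ' ' ∨ st.2 ≠ some ' ' then st.1 ++ [c] else st.1, some c))
    (([] : List Char), (none : Option Char))
  let collapsed := st.1
  -- drop a space left at the front
  let collapsed := if collapsed.head? = some ' ' then collapsed.tail else collapsed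
  -- pass 2: keep letters and the surviving spaces
  let kept := collapsed.filter (fun c => PySem.Chars.isalpha c || c == ' ')
  -- same trailing rule as the original
  let kept := if kept ≠ [] ∧ PySem.List.pyGetD kept (-1) ' ' = ' ' then
      PySem.List.slice kept none (some (-2)) else kept
  String.ofList (PySem.Chars.lower kept)

-- ===== PRECONDITION & SPEC =====
def Spec_normal_string (string : String) (out : String) : Prop := out = normal_string_alt string
instance (string : String) (out : String) : Decidable (Spec_normal_string string out) := by unfold Spec_normal_string; infer_instance

-- ===== CLAIM (what is proved, stated in full; the proofs are below) =====
def Claim_equal_normal_string : Prop := ∀ (string : String), Dom_normal_string string → Spec_normal_string string (normal_string string)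

-- ===== LEMMAS AND PROOFS =====

-- the sequence of kept characters (letters, plus a space whenever the previous
-- ORIGINAL character exists and is not a space), as a pairwise recursion
def pvContrib (prev : Option Char) (c : Char) : List Char :=
  if PySem.Chars.isalpha c then [c]
  else if c = ' ' ∧ prev ≠ none ∧ prev ≠ some ' ' then [' ']
  else []

def pvRet : Option Char → List Char → List Char
  | _, [] => []
  | prev, c :: t => pvContrib prev c ++ pvRet (some c) t

-- B's pass-1 result as a pairwise recursion
def pvCollapse : Option Char → List Char → List Char
  | _, [] => []
  | prev, c :: t => (if c ≠ ' ' ∨ prev ≠ some ' ' then [c] else []) ++ pvCollapse (some c) t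

theorem pvA_loop (cs : List Char) : ∀ (suf pre acc : List Char), cs = pre ++ suf →
    (PySem.List.pyRange (pre.length : Int) (cs.length : Int) 1).foldl
      (fun ret i =>
        if PySem.Chars.isalpha (PySem.List.pyGetD cs i ' ') then
          ret ++ [PySem.List.pyGetD cs i ' ']
        else if PySem.List.pyGetD cs i ' ' = ' ' ∧ i ≠ 0 then
          (if PySem.List.pyGetD cs (i - 1) ' ' ≠ ' ' then ret ++ [' '] else ret)
        else ret)
      acc = acc ++ pvRet pre.getLast? suf := by
  intro suf
  induction suf with
  | nil =>
    intro pre acc h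
    have : (pre.length : Int) = (cs.length : Int) := by simp [h]
    rw [this, PySem.List.pyRange_one_eq_nil (le_refl _)]
    simp [pvRet]
  | cons c t ih =>
    intro pre acc h
    have hlen : cs.length = pre.length + 1 + t.length := by simp [h]; omega
    have hlt : (pre.length : Int) < (cs.length : Int) := by
      rw [hlen]; push_cast; omega
    rw [PySem.List.pyRange_one_cons hlt]
    have hc : PySem.List.pyGetD cs (pre.length : Int) ' ' = c := by
      rw [PySem.List.pyGetD_natCast, h]
      simp [List.getD]
    have halnsp : PySem.Chars.isalpha ' ' = false := by decide
    have hstep :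
        (if PySem.Chars.isalpha (PySem.List.pyGetD cs (pre.length : Int) ' ') then
          acc ++ [PySem.List.pyGetD cs (pre.length : Int) ' ']
        else if PySem.List.pyGetD cs (pre.length : Int) ' ' = ' ' ∧ (pre.length : Int) ≠ 0 then
          (if PySem.List.pyGetD cs ((pre.length : Int) - 1) ' ' ≠ ' ' then acc ++ [' '] else acc)
        else acc) = acc ++ pvContrib pre.getLast? c := by
      rw [hc]
      by_cases ha : PySem.Chars.isalpha c
      · simp [ha, pvContrib]
      · by_cases hsp : c = ' '
        · subst hsp
          rw [if_neg (by simp [halnsp])]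
          cases pre with
          | nil =>
            rw [if_neg (by simp)]
            simp [pvContrib, halnsp]
          | cons p ps =>
            have hneInt : (((p :: ps).length : Nat) : Int) ≠ 0 := by push_cast [List.length_cons]; omega
            rw [if_pos ⟨rfl, hneInt⟩]
            have hl : (p :: ps).length - 1 < (p :: ps).length := by simp
            have hidx : ((((p :: ps).length : Nat) : Int) - 1) = (((p :: ps).length - 1 : Nat) : Int) := by
              push_cast [Nat.cast_sub (by omega : 1 ≤ (p :: ps).length)]; ring
            have hprev : PySem.List.pyGetD cs ((((p :: ps).length : Nat) : Int) - 1) ' '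
                = (p :: ps).getLast (by simp) := by
              rw [hidx, PySem.List.pyGetD_natCast, h, List.getD_eq_getElem?_getD,
                List.getElem?_append_left hl, List.getLast_eq_getElem]
              simp
              try rfl
            rw [hprev]
            have hgl : (p :: ps).getLast? = some ((p :: ps).getLast (by simp)) := by
              simp [List.getLast?_eq_some_getLast]
            by_cases hpl : (p :: ps).getLast (by simp) = ' '
            · rw [if_neg (by simpa using hpl)]
              simp [pvContrib, halnsp, hgl, hpl]
            · rw [if_pos (by simpa using hpl)]
              simp [pvContrib, halnsp, hgl, hpl]
        · simp [ha, hsp, pvContrib]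
    rw [List.foldl_cons, hstep]
    have hnext : ((pre.length : Int) + 1) = (((pre ++ [c]).length : Nat) : Int) := by
      simp
    rw [hnext, ih (pre ++ [c]) (acc ++ pvContrib pre.getLast? c) (by simp [h])]
    simp [pvRet]

theorem pvB_loop : ∀ (cs acc : List Char) (prev : Option Char),
    (cs.foldl (fun (st : List Char × Option Char) c =>
        (if c ≠ ' ' ∨ st.2 ≠ some ' ' then st.1 ++ [c] else st.1, some c))
      (acc, prev)).1 = acc ++ pvCollapse prev cs := by
  intro cs
  induction cs with
  | nil => intro acc prev; simp [pvCollapse]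
  | cons c t ih =>
    intro acc prev
    have hstep : ((c :: t).foldl (fun (st : List Char × Option Char) c =>
          (if c ≠ ' ' ∨ st.2 ≠ some ' ' then st.1 ++ [c] else st.1, some c)) (acc, prev)).1
        = (t.foldl (fun (st : List Char × Option Char) c =>
          (if c ≠ ' ' ∨ st.2 ≠ some ' ' then st.1 ++ [c] else st.1, some c))
          ((if c ≠ ' ' ∨ prev ≠ some ' ' then acc ++ [c] else acc), some c)).1 := rfl
    rw [hstep]
    by_cases hcp : c ≠ ' ' ∨ prev ≠ some ' '
    · rw [if_pos hcp, ih (acc ++ [c]) (some c)]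
      simp [pvCollapse, hcp]
    · rw [if_neg hcp, ih acc (some c)]
      simp [pvCollapse, hcp]

theorem pvFilter_collapse : ∀ (cs : List Char) (p : Char),
    (pvCollapse (some p) cs).filter (fun c => PySem.Chars.isalpha c || c == ' ')
      = pvRet (some p) cs := by
  intro cs
  induction cs with
  | nil => intro p; simp [pvCollapse, pvRet]
  | cons c t ih =>
    intro p
    have halnsp : PySem.Chars.isalpha ' ' = false := by decide
    by_cases ha : PySem.Chars.isalpha c
    · have hcs : c ≠ ' ' := by intro h; rw [h] at ha; simp [halnsp] at ha
      simp [pvCollapse, pvRet, pvContrib, ha, hcs, ih]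
    · by_cases hsp : c = ' '
      · subst hsp
        by_cases hp : p = ' '
        · simp [pvCollapse, pvRet, pvContrib, ha, hp, ih]
        · simp [pvCollapse, pvRet, pvContrib, ha, hp, ih]
      · simp [pvCollapse, pvRet, pvContrib, ha, hsp, ih]

theorem pvPipeline (cs : List Char) :
    ((if (pvCollapse none cs).head? = some ' ' then (pvCollapse none cs).tail
      else pvCollapse none cs).filter (fun c => PySem.Chars.isalpha c || c == ' '))
      = pvRet none cs := by
  cases cs with
  | nil => simp [pvCollapse, pvRet]
  | cons c t =>
    have hcol : pvCollapse none (c :: t) = c :: pvCollapse (some c) t := by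
      simp [pvCollapse]
    rw [hcol]
    by_cases hsp : c = ' '
    · subst hsp
      simp [pvFilter_collapse, pvRet, pvContrib]
      decide
    · have ha : pvContrib none c = if PySem.Chars.isalpha c then [c] else [] := by
        simp [pvContrib, hsp]
      by_cases hal : PySem.Chars.isalpha c
      · simp [hsp, pvRet, ha, hal, pvFilter_collapse]
      · simp [hsp, pvRet, ha, hal, pvFilter_collapse]

-- ===== VERDICT (by name: the statement is the Claim_ definition above) =====
theorem normal_string_spec : Claim_equal_normal_string := by
  intro string _
  unfold Spec_normal_string
  have hA := pvA_loop string.toList string.toList [] [] (by simp)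
  simp only [List.length_nil, Nat.cast_zero, List.nil_append, List.getLast?_nil] at hA
  have hB := pvB_loop string.toList [] none
  simp only [List.nil_append] at hB
  have hlen : PySem.Str.len string = ((string.toList.length : Nat) : Int) := by
    simp [pysem]
  simp only [normal_string, normal_string_alt, hlen]
  rw [hA, hB, pvPipeline]
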